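-- pv_equiv track=rewrite | github.com/Pepedrm/Practica1TDMD | ejercicio3.py | es_dirigido
-- ===== SOURCE A (Python) =====
-- def es_dirigido(P, R, A):
--     """Verifica si el subconjunto A es dirigido bajo la relación R."""
--     # Para cada par de elementos (a, b) en A
--     for i in range(len(A)):
--         for j in range(i + 1, len(A)):
--             a, b = A[i], A[j]
--             encontrado_mayor_comun_superior = False
--             # Verificamos si existe un c en A tal que (a, c) y (b, c) pertenezcan a R
--             for c in A:
--                 if (a, c) in R and (b, c) in R:
--                     encontrado_mayor_comun_superior = True
--                     break
--             # Si no se encontró tal c, entonces A no es dirigido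
--             if not encontrado_mayor_comun_superior:
--                 return False
--     # Si se cumple para todos los pares, A es dirigido
--     return True
-- ===== SOURCE B (Python) =====
-- def es_dirigido(P, R, A):
--     """Verifica si el subconjunto A es dirigido bajo la relacion R."""
--     # Invert the search: group R by upper bound c in ONE pass, then record
--     # every pair (x, y) covered by some c; each pair of A then needs only
--     # a membership test (no per-pair search).
--     down = {c: set() for c in A}       # keys = the values of A
--     for x, c in R:
--         if c in down and x in down:
--             down[c].add(x)
--     covered = set()
--     for d in down.values():
--         for x in d:
--             for y in d:
--                 covered.add((x, y))
--     for i, a in enumerate(A):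
--         for b in A[i + 1:]:
--             if (a, b) not in covered:
--                 return False
--     return True
-- ===== Notes on version B (the rewrite author's own statement) =====
-- stated objective: alternative
-- what changed: B inverts the search: it groups R by upper bound in one pass (a dict of lower sets keyed by candidate c), then marks every pair covered by some c in a precomputed 'covered' set, so the pair check is plain membership with no per-pair inner scan over c and R; A's per-pair early exit can still beat B's eager precomputation, so no speed is claimed.
import Mathlib
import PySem

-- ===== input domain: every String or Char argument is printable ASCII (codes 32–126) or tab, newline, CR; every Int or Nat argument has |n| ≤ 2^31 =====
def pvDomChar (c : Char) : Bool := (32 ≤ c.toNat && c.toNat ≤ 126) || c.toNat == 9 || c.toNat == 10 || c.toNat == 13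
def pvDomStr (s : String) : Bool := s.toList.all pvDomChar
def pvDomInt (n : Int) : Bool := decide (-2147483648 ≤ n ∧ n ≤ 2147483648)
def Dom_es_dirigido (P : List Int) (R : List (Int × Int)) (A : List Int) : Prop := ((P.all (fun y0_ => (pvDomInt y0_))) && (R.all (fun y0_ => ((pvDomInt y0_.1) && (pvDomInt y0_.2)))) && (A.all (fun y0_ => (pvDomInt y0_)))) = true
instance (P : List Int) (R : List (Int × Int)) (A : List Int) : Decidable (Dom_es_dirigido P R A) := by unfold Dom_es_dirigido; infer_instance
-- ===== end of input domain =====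

-- B inverts the search: it precomputes, by iterating over candidate upper bounds c, the set of
-- all pairs covered by some c in A, so the pair loop does only membership tests (objective: alternative).

-- ===== PORT A =====
-- inner 'for c in A: if (a,c) in R and (b,c) in R: found = True; break'
def edFindC (R : List (Int × Int)) (A : List Int) (a b : Int) : Bool :=
  A.any (fun c => R.contains (a, c) && R.contains (b, c))

-- the two index loops over pairs i < j of A, with early 'return False'
def edPairs (R : List (Int × Int)) (A : List Int) : List Int → Bool
  | [] => true
  | a :: rest =>
    if rest.all (fun b => edFindC R A a b) then edPairs R A rest else false

def es_dirigido (P : List Int) (R : List (Int × Int)) (A : List Int) : Bool :=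
  edPairs R A A

-- ===== PORT B =====
-- "down = {c: set() for c in A}"
def edInit (A : List Int) : PySem.Dict Int (PySem.Set Int) :=
  A.foldl (fun d c => d.insert c PySem.Set.empty) PySem.Dict.empty

-- "for x, c in R: if c in down and x in down: down[c].add(x)"
def edStep (d : PySem.Dict Int (PySem.Set Int)) (q : Int × Int) :
    PySem.Dict Int (PySem.Set Int) :=
  if d.contains q.2 && d.contains q.1 then
    d.modify q.2 PySem.Set.empty (fun s => PySem.Set.add s q.1)
  else d

def edGroups (R : List (Int × Int)) (A : List Int) : PySem.Dict Int (PySem.Set Int) :=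
  R.foldl edStep (edInit A)

-- "for d in down.values(): for x in d: for y in d: covered.add((x, y))"
-- (iteration over the set d only builds another set, so order cannot matter)
def edCovered (R : List (Int × Int)) (A : List Int) : PySem.Set (Int × Int) :=
  (edGroups R A).values.foldl (fun s d =>
    d.foldl (fun s x => d.foldl (fun s y => PySem.Set.add s (x, y)) s) s)
    PySem.Set.empty

-- "for i, a in enumerate(A): for b in A[i+1:]: if (a, b) not in covered: return False"
def edCheck (cov : PySem.Set (Int × Int)) : List Int → Bool
  | [] => true
  | a :: rest =>
    if rest.all (fun b => PySem.Set.contains cov (a, b)) then edCheck cov rest else false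

def es_dirigido_alt (P : List Int) (R : List (Int × Int)) (A : List Int) : Bool :=
  edCheck (edCovered R A) A

-- ===== PRECONDITION & SPEC =====
def Spec_es_dirigido (P : List Int) (R : List (Int × Int)) (A : List Int) (out : Bool) : Prop := out = es_dirigido_alt P R A
instance (P : List Int) (R : List (Int × Int)) (A : List Int) (out : Bool) : Decidable (Spec_es_dirigido P R A out) := by unfold Spec_es_dirigido; infer_instance

-- ===== CLAIM =====
def Claim_equal_es_dirigido : Prop := ∀ (P : List Int) (R : List (Int × Int)) (A : List Int), Dom_es_dirigido P R A → Spec_es_dirigido P R A (es_dirigido P R A)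

-- ===== LEMMAS AND PROOFS =====

-- innermost fold: pairs (x, y) with y from l get added
theorem mem_fold_add_pairs (x : Int) (l : List Int) (s : PySem.Set (Int × Int)) (p : Int × Int) :
    (p ∈ l.foldl (fun s y => PySem.Set.add s (x, y)) s) ↔ p ∈ s ∨ (p.1 = x ∧ p.2 ∈ l) := by
  induction l generalizing s with
  | nil => simp
  | cons y t ih =>
    simp only [List.foldl_cons, ih, PySem.Set.mem_add, List.mem_cons, Prod.ext_iff]
    tauto

-- middle fold over x: pairs within l × d get added
theorem mem_fold_add_sq (d : List Int) (l : List Int) (s : PySem.Set (Int × Int)) (p : Int × Int) :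
    (p ∈ l.foldl (fun s x => d.foldl (fun s y => PySem.Set.add s (x, y)) s) s) ↔
      p ∈ s ∨ (p.1 ∈ l ∧ p.2 ∈ d) := by
  induction l generalizing s with
  | nil => simp
  | cons x t ih =>
    simp only [List.foldl_cons, ih, mem_fold_add_pairs, List.mem_cons]
    tauto

-- outer fold over the groups: membership in 'covered'
theorem mem_fold_values (vs : List (PySem.Set Int)) (s : PySem.Set (Int × Int)) (p : Int × Int) :
    (p ∈ vs.foldl (fun s d =>
        d.foldl (fun s x => d.foldl (fun s y => PySem.Set.add s (x, y)) s) s) s) ↔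
      p ∈ s ∨ ∃ d ∈ vs, p.1 ∈ d ∧ p.2 ∈ d := by
  induction vs generalizing s with
  | nil => simp
  | cons d t ih =>
    simp only [List.foldl_cons, ih, mem_fold_add_sq, List.mem_cons]
    constructor
    · rintro (h | h) <;> [rcases h with h | h; skip]
      · exact Or.inl h
      · exact Or.inr ⟨d, Or.inl rfl, h⟩
      · obtain ⟨d', hd', h'⟩ := h; exact Or.inr ⟨d', Or.inr hd', h'⟩
    · rintro (h | ⟨d', hd | hd, h'⟩)
      · exact Or.inl (Or.inl h)
      · exact Or.inl (Or.inr (hd ▸ h'))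
      · exact Or.inr ⟨d', hd, h'⟩

-- the initial dict: one key per value of A, all mapped to the empty set
theorem getD_edInit_aux (l : List Int) (d : PySem.Dict Int (PySem.Set Int)) (k : Int) :
    (l.foldl (fun d c => d.insert c PySem.Set.empty) d).getD k PySem.Set.empty
      = if k ∈ l then PySem.Set.empty else d.getD k PySem.Set.empty := by
  induction l generalizing d with
  | nil => simp
  | cons c t ih =>
    simp only [List.foldl_cons, ih, PySem.Dict.getD_insert, List.mem_cons]
    by_cases h1 : k ∈ t <;> by_cases h2 : k = c <;> simp [h1, h2]

theorem getD_edInit (A : List Int) (k : Int) :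
    (edInit A).getD k PySem.Set.empty = PySem.Set.empty := by
  rw [edInit, getD_edInit_aux]
  split <;> simp [PySem.Dict.getD_empty]

theorem contains_edInit (A : List Int) (k : Int) :
    (edInit A).contains k = A.contains k := by
  rw [edInit, PySem.Dict.contains_eq_decide_mem_keys, PySem.Dict.keys_foldl_insert,
    PySem.Dict.keys_empty]
  simp [PySem.Set.update_nil_left, PySem.Set.mem_ofList]

theorem keys_edInit (A : List Int) : (edInit A).keys = PySem.Set.ofList A := by
  rw [edInit, PySem.Dict.keys_foldl_insert, PySem.Dict.keys_empty, PySem.Set.update_nil_left]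

-- one step of the grouping loop preserves keys and contains
theorem contains_edStep (d : PySem.Dict Int (PySem.Set Int)) (q : Int × Int) (k : Int) :
    (edStep d q).contains k = d.contains k := by
  rw [edStep]
  split
  · next h =>
    rw [PySem.Dict.contains_modify]
    rcases Bool.and_eq_true .. |>.mp h with ⟨h2, _⟩
    by_cases hk : k = q.2 <;> simp [hk, h2]
  · rfl

theorem keys_edStep (d : PySem.Dict Int (PySem.Set Int)) (q : Int × Int) :
    (edStep d q).keys = d.keys := by
  rw [edStep]
  split
  · next h =>
    rw [PySem.Dict.keys_modify]
    rcases Bool.and_eq_true .. |>.mp h with ⟨h2, _⟩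
    simp [PySem.Dict.keys_insert_of_contains, h2]
  · rfl

-- the grouping loop: membership in the group of c
theorem getD_edGroups_aux (A : List Int) (l : List (Int × Int))
    (d : PySem.Dict Int (PySem.Set Int)) (hc : ∀ k, d.contains k = A.contains k)
    (c x : Int) :
    (x ∈ (l.foldl edStep d).getD c PySem.Set.empty) ↔
      x ∈ d.getD c PySem.Set.empty ∨ (c ∈ A ∧ x ∈ A ∧ (x, c) ∈ l) := by
  induction l generalizing d with
  | nil => simp
  | cons q t ih =>
    obtain ⟨qx, qc⟩ := q
    have hc' : ∀ k, (edStep d (qx, qc)).contains k = A.contains k := by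
      intro k; rw [contains_edStep]; exact hc k
    simp only [List.foldl_cons, ih (edStep d (qx, qc)) hc', List.mem_cons]
    have hmem : (x ∈ (edStep d (qx, qc)).getD c PySem.Set.empty) ↔
        x ∈ d.getD c PySem.Set.empty ∨ (c ∈ A ∧ x ∈ A ∧ (x, c) = (qx, qc)) := by
      rw [edStep]
      split
      · next h =>
        rcases Bool.and_eq_true .. |>.mp h with ⟨h2, h1⟩
        rw [hc, List.contains_iff_mem] at h1 h2
        rw [PySem.Dict.getD_modify]
        by_cases hcq : c = qc
        · subst hcq
          rw [if_pos rfl, PySem.Set.mem_add]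
          simp only [Prod.mk.injEq, and_true]
          constructor
          · rintro (h' | rfl)
            · exact Or.inl h'
            · exact Or.inr ⟨h2, h1, rfl⟩
          · rintro (h' | ⟨_, _, rfl⟩)
            · exact Or.inl h'
            · exact Or.inr rfl
        · rw [if_neg hcq]
          constructor
          · exact Or.inl
          · rintro (h' | ⟨_, _, h3⟩)
            · exact h'
            · exact absurd (congrArg Prod.snd h3) hcq
      · next h =>
        constructor
        · exact Or.inl
        · rintro (hm | ⟨hcA, hxA, h3⟩)
          · exact hm
          · exfalso
            rw [Prod.mk.injEq] at h3
            obtain ⟨e1, e2⟩ := h3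
            subst e1; subst e2
            have hb : (d.contains c && d.contains x) = true := by
              rw [Bool.and_eq_true, hc, hc, List.contains_iff_mem, List.contains_iff_mem]
              exact ⟨hcA, hxA⟩
            exact h hb
    rw [hmem]
    tauto

theorem getD_edGroups (R : List (Int × Int)) (A : List Int) (c x : Int) :
    (x ∈ (edGroups R A).getD c PySem.Set.empty) ↔ c ∈ A ∧ x ∈ A ∧ (x, c) ∈ R := by
  rw [edGroups, getD_edGroups_aux A R (edInit A) (contains_edInit A), getD_edInit]
  simp [PySem.Set.empty]

theorem keys_edGroups_aux (l : List (Int × Int)) (d : PySem.Dict Int (PySem.Set Int)) :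
    (l.foldl edStep d).keys = d.keys := by
  induction l generalizing d with
  | nil => rfl
  | cons q t ih => rw [List.foldl_cons, ih, keys_edStep]

theorem keys_edGroups (R : List (Int × Int)) (A : List Int) :
    (edGroups R A).keys = PySem.Set.ofList A := by
  rw [edGroups, keys_edGroups_aux, keys_edInit]

-- the per-pair conditions of the two programs coincide
theorem contains_covered_eq_findC (R : List (Int × Int)) (A : List Int) (a b : Int)
    (ha : a ∈ A) (hb : b ∈ A) :
    PySem.Set.contains (edCovered R A) (a, b) = edFindC R A a b := by
  have hnd : (edGroups R A).keys.Nodup := by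
    rw [keys_edGroups]; exact PySem.Set.nodup_ofList A
  have hvals : (edGroups R A).values
      = (edGroups R A).keys.map (fun k => (edGroups R A).getD k PySem.Set.empty) :=
    PySem.Dict.values_eq_map_keys _ hnd _
  have hmem : ((a, b) ∈ edCovered R A) ↔ ∃ c ∈ A, (a, c) ∈ R ∧ (b, c) ∈ R := by
    rw [edCovered, mem_fold_values, hvals]
    constructor
    · rintro (h | ⟨d, hd, h1, h2⟩)
      · simp [PySem.Set.empty] at h
      · obtain ⟨c, hck, rfl⟩ := List.mem_map.mp hd
        rw [getD_edGroups] at h1 h2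
        exact ⟨c, h1.1, h1.2.2, h2.2.2⟩
    · rintro ⟨c, hcA, h1, h2⟩
      refine Or.inr ⟨(edGroups R A).getD c PySem.Set.empty,
        List.mem_map.mpr ⟨c, by rw [keys_edGroups]; exact (PySem.Set.mem_ofList ..).mpr hcA, rfl⟩, ?_, ?_⟩
      · exact (getD_edGroups R A c a).mpr ⟨hcA, ha, h1⟩
      · exact (getD_edGroups R A c b).mpr ⟨hcA, hb, h2⟩
  rcases hf : edFindC R A a b with _ | _
  · rw [Bool.eq_false_iff]
    intro hcov
    obtain ⟨c, hcA, h1, h2⟩ := hmem.mp (by simpa [PySem.Set.contains_iff] using hcov)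
    have : edFindC R A a b = true := by
      simp only [edFindC, List.any_eq_true]
      exact ⟨c, hcA, by rw [Bool.and_eq_true]; exact ⟨List.contains_iff_mem.mpr h1, List.contains_iff_mem.mpr h2⟩⟩
    simp [this] at hf
  · obtain ⟨c, hcA, hcond⟩ := by simpa only [edFindC, List.any_eq_true] using hf
    simp only [Bool.and_eq_true, List.contains_iff_mem] at hcond
    have : (a, b) ∈ edCovered R A := hmem.mpr ⟨c, hcA, hcond.1, hcond.2⟩
    simpa [PySem.Set.contains_iff] using this

-- the two pair loops agree on any sublist of A
theorem edPairs_eq_edCheck (R : List (Int × Int)) (A : List Int) (l : List Int)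
    (hl : ∀ x ∈ l, x ∈ A) :
    edPairs R A l = edCheck (edCovered R A) l := by
  induction l with
  | nil => rfl
  | cons a rest ih =>
    have ha : a ∈ A := hl a (List.mem_cons_self ..)
    have hrest : ∀ x ∈ rest, x ∈ A := fun x hx => hl x (List.mem_cons_of_mem _ hx)
    have hcond : rest.all (fun b => edFindC R A a b)
        = rest.all (fun b => PySem.Set.contains (edCovered R A) (a, b)) := by
      rw [Bool.eq_iff_iff]
      simp only [List.all_eq_true]
      exact ⟨fun h b hb => (contains_covered_eq_findC R A a b ha (hrest b hb)).trans (h b hb),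
             fun h b hb => (contains_covered_eq_findC R A a b ha (hrest b hb)).symm.trans (h b hb)⟩
    simp only [edPairs, edCheck, ← hcond]
    split
    · exact ih hrest
    · rfl

-- ===== VERDICT =====
theorem es_dirigido_spec : Claim_equal_es_dirigido := by
  intro P R A _
  unfold Spec_es_dirigido es_dirigido es_dirigido_alt
  exact edPairs_eq_edCheck R A A (fun _ h => h)
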